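-- pv_equiv track=rewrite | github.com/kesyog/adventofcode2020 | day14/p14.py | get_all_masks
-- ===== SOURCE A (Python) =====
-- def get_all_masks(mask):
--     if "X" in mask:
--         i = mask.index("X")
--         # c = clear bit
--         mask = mask[:i] + "c" + mask[i + 1 :]
--         for j in get_all_masks(mask):
--             yield j
--         mask = mask[:i] + "1" + mask[i + 1 :]
--         for j in get_all_masks(mask):
--             yield j
--     else:
--         yield mask
-- ===== SOURCE B (Python) =====
-- def get_all_masks(mask):
--     parts = mask.split("X")
--     combos = [parts[-1]]
--     for part in reversed(parts[:-1]):
--         combos = [part + "c" + s for s in combos] + [part + "1" + s for s in combos]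
--     yield from combos
-- ===== Notes on version B (the rewrite author's own statement) =====
-- stated objective: simpler
-- what changed: Replaces A's recursive generator (find the first X, splice in 'c'/'1', recurse on the whole modified string) with splitting the mask on 'X' once and a single fold over the segments from the right that doubles the list of completed combinations at each boundary.
import Mathlib
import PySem

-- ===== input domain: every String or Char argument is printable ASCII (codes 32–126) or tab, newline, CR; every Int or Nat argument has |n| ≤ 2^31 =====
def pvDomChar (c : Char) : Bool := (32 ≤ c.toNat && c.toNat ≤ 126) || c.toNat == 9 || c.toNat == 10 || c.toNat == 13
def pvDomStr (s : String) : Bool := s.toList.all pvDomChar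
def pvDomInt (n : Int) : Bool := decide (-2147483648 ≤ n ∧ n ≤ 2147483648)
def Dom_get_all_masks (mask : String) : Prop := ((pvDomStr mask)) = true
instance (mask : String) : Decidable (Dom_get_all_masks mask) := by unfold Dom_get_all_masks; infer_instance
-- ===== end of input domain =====

-- B replaces A's recursive generator (find the first X, splice in 'c'/'1', recurse on the
-- whole modified string) by splitting the mask on 'X' once and folding the segments from the
-- right, doubling the combination list at each boundary (objective: simpler).

-- ===== PORT A =====
-- termination helper for the port's recursion: replacing the first 'X' lowers the 'X' count
theorem pvCountDrop (m : List Char) (h : 'X' ∈ m) (c : Char) (hc : c ≠ 'X') :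
    (m.take (m.idxOf 'X') ++ c :: m.drop (m.idxOf 'X' + 1)).count 'X' < m.count 'X' := by
  have hlt : m.idxOf 'X' < m.length := List.idxOf_lt_length_of_mem h
  have hsplit : m = m.take (m.idxOf 'X') ++ 'X' :: m.drop (m.idxOf 'X' + 1) := by
    conv_lhs => rw [← List.take_append_drop (m.idxOf 'X') m]
    rw [List.drop_eq_getElem_cons hlt, List.getElem_idxOf]
  calc (m.take (m.idxOf 'X') ++ c :: m.drop (m.idxOf 'X' + 1)).count 'X'
      = (m.take (m.idxOf 'X')).count 'X' + (m.drop (m.idxOf 'X' + 1)).count 'X' := by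
        simp [List.count_append, hc]
    _ < (m.take (m.idxOf 'X')).count 'X' + (1 + (m.drop (m.idxOf 'X' + 1)).count 'X') := by omega
    _ = m.count 'X' := by
        conv_rhs => rw [hsplit]
        simp [List.count_append]
        omega

-- literal transliteration of A's recursion on the character list of the mask
def pvGamA (m : List Char) : List String :=
  if h : 'X' ∈ m then have _ := h
    let i := m.idxOf 'X'
    let m1 := m.take i ++ 'c' :: m.drop (i + 1)   -- mask[:i] + "c" + mask[i+1:]
    let m2 := m.take i ++ '1' :: m.drop (i + 1)   -- mask[:i] + "1" + mask[i+1:]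
    pvGamA m1 ++ pvGamA m2
  else [String.mk m]
termination_by m.count 'X'
decreasing_by
  · exact pvCountDrop m h 'c' (by decide)
  · exact pvCountDrop m h '1' (by decide)

def get_all_masks (mask : String) : List String := pvGamA mask.toList

-- ===== PORT B =====
-- Source B: split the mask on 'X', then fold the segments from the right, doubling the
-- combination list ('c'-variant first, then '1'-variant) at each boundary
def pvBStep (combos : List (List Char)) (part : List Char) : List (List Char) :=
  combos.map (fun s => part ++ 'c' :: s) ++ combos.map (fun s => part ++ '1' :: s)

def get_all_masks_alt (mask : String) : List String :=
  let parts := mask.toList.splitOn 'X'            -- mask.split("X")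
  let init := [parts.getLastD []]                 -- combos = [parts[-1]]
  ((parts.dropLast.reverse).foldl pvBStep init).map (fun cs => String.mk cs)

-- ===== PRECONDITION & SPEC =====
def Spec_get_all_masks (mask : String) (out : List String) : Prop := out = get_all_masks_alt mask
instance (mask : String) (out : List String) : Decidable (Spec_get_all_masks mask out) := by unfold Spec_get_all_masks; infer_instance

-- ===== CLAIM (what is proved, stated in full; the proofs are below) =====
def Claim_equal_get_all_masks : Prop := ∀ (mask : String), Dom_get_all_masks mask → Spec_get_all_masks mask (get_all_masks mask)

-- ===== LEMMAS AND PROOFS =====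
-- pvStep/pvF: A's enumeration re-stated as one fold over the characters (proof-side view)
def pvStep (combos : List (List Char)) (ch : Char) : List (List Char) :=
  if ch == 'X' then combos.map ('c' :: ·) ++ combos.map ('1' :: ·)
  else combos.map (ch :: ·)

def pvF (m : List Char) : List (List Char) := List.foldr (fun a b => pvStep b a) [[]] m

theorem pvF_append (xs ys : List Char) :
    pvF (xs ++ ys) = List.foldr (fun a b => pvStep b a) (pvF ys) xs := by
  simp [pvF, List.foldr_append]

theorem pvF_noX (xs : List Char) (acc : List (List Char)) (h : 'X' ∉ xs) :
    List.foldr (fun a b => pvStep b a) acc xs = acc.map (xs ++ ·) := by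
  induction xs with
  | nil => simp
  | cons c rest ih =>
    have hc : c ≠ 'X' := fun hc => h (by simp [hc])
    have hr : 'X' ∉ rest := fun hr => h (by simp [hr])
    simp only [List.foldr_cons]
    rw [ih hr]
    simp [pvStep, hc, List.map_map, Function.comp]

theorem pvGamA_eq_F (m : List Char) : pvGamA m = (pvF m).map (fun cs => String.mk cs) := by
  generalize hn : m.count 'X' = n
  induction n using Nat.strong_induction_on generalizing m with
  | _ n ih =>
  by_cases h : 'X' ∈ m
  · have hlt : m.idxOf 'X' < m.length := List.idxOf_lt_length_of_mem h
    have hpre : 'X' ∉ m.take (m.idxOf 'X') := by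
      intro hmem
      obtain ⟨j, hj, hget⟩ := List.getElem_of_mem hmem
      have hjlt : j < m.idxOf 'X' := lt_of_lt_of_le hj (by simp)
      have hfalse : ((m[j]'(lt_trans hjlt hlt)) == 'X') = false := List.not_of_lt_findIdx hjlt
      rw [List.getElem_take] at hget
      simp [hget] at hfalse
    have hsplit : m = m.take (m.idxOf 'X') ++ 'X' :: m.drop (m.idxOf 'X' + 1) := by
      conv_lhs => rw [← List.take_append_drop (m.idxOf 'X') m]
      rw [List.drop_eq_getElem_cons hlt, List.getElem_idxOf]
    set pre := m.take (m.idxOf 'X') with hpredef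
    set suf := m.drop (m.idxOf 'X' + 1) with hsufdef
    have h1 : (pre ++ 'c' :: suf).count 'X' < n := hn ▸ pvCountDrop m h 'c' (by decide)
    have h2 : (pre ++ '1' :: suf).count 'X' < n := hn ▸ pvCountDrop m h '1' (by decide)
    rw [pvGamA]
    simp only [h, dif_pos]
    rw [ih _ h1 _ rfl, ih _ h2 _ rfl]
    have expand : ∀ c : Char, c ≠ 'X' →
        pvF (pre ++ c :: suf) = ((pvF suf).map (c :: ·)).map (pre ++ ·) := by
      intro c hc
      rw [pvF_append, pvF_noX _ _ hpre]
      congr 1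
      show List.foldr (fun a b => pvStep b a) (pvF suf) (c :: []) = _
      simp [pvStep, hc]
    have hx : pvF m = ((pvF suf).map ('c' :: ·) ++ (pvF suf).map ('1' :: ·)).map (pre ++ ·) := by
      conv_lhs => rw [hsplit]
      rw [pvF_append, pvF_noX _ _ hpre]
      congr 1
    rw [expand 'c' (by decide), expand '1' (by decide), hx]
    simp [List.map_append]
  · rw [pvGamA]
    simp only [h, dif_neg, not_false_iff]
    simp only [pvF]
    rw [pvF_noX m [[]] h]
    simp

-- pvH: the foldr form of Source B's loop over the split segments
def pvH : List (List Char) → List (List Char)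
  | [] => [[]]
  | [p] => [p]
  | p :: q :: rest => pvBStep (pvH (q :: rest)) p

theorem pvH_cons_head (c : Char) (p : List Char) (rest : List (List Char)) :
    pvH ((c :: p) :: rest) = (pvH (p :: rest)).map (c :: ·) := by
  cases rest with
  | nil => simp [pvH]
  | cons q rs => simp [pvH, pvBStep, List.map_map, Function.comp_def]

theorem pvH_splitOnP (m : List Char) :
    pvH (List.splitOnP (fun c => c == 'X') m) = pvF m := by
  induction m with
  | nil => simp [List.splitOnP_nil, pvH, pvF]
  | cons c m ih =>
    have hne : List.splitOnP (fun c => c == 'X') m ≠ [] := List.splitOnP_ne_nil _ m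
    obtain ⟨r, rs, hrs⟩ := List.exists_cons_of_ne_nil hne
    have hF : pvF (c :: m) = pvStep (pvF m) c := rfl
    rw [List.splitOnP_cons, hF]
    by_cases hc : c = 'X'
    · simp only [hc, beq_self_eq_true, if_true]
      rw [hrs]
      show pvBStep (pvH (r :: rs)) [] = _
      rw [← hrs, ih]
      simp [pvBStep, pvStep]
    · simp only [beq_iff_eq, hc, if_false]
      rw [hrs]
      show pvH ((c :: r) :: rs) = _
      rw [pvH_cons_head, ← hrs, ih]
      simp [pvStep, hc]

theorem pvAlt_eq (mask : String) :
    get_all_masks_alt mask = (pvH (mask.toList.splitOn 'X')).map (fun cs => String.mk cs) := by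
  show (((mask.toList.splitOn 'X').dropLast.reverse).foldl pvBStep
      [(mask.toList.splitOn 'X').getLastD []]).map (fun cs => String.mk cs) = _
  congr 1
  rw [List.foldl_reverse]
  generalize mask.toList.splitOn 'X' = parts
  induction parts with
  | nil => simp [pvH]
  | cons p rest ih =>
    cases rest with
    | nil => simp [pvH]
    | cons q rs =>
      rw [List.dropLast_cons_of_ne_nil (by simp), List.foldr_cons]
      simp only [List.getLastD_cons] at ih ⊢
      rw [ih]
      simp [pvH]

-- ===== VERDICT (by name: the statement is the Claim_ definition above) =====
theorem get_all_masks_spec : Claim_equal_get_all_masks := by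
  intro mask _
  show get_all_masks mask = get_all_masks_alt mask
  rw [pvAlt_eq]
  show pvGamA mask.toList = _
  rw [pvGamA_eq_F]
  congr 1
  exact (pvH_splitOnP mask.toList).symm
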